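-- pv_equiv track=rewrite | github.com/odd-incubus/RHCR | scripts/visualize_sort.py | get_agent_position_at_time
-- ===== SOURCE A (Python) =====
-- def get_agent_position_at_time(agent_path_dict, time):
--     """Gets agent position. If time is beyond recorded path, returns last known position."""
--     if not agent_path_dict: # Empty path
--         return None
--
--     if time in agent_path_dict:
--         return agent_path_dict[time]
--     else:
--         # Find the largest time in path <= current time
--         available_times = sorted([t for t in agent_path_dict.keys() if t <= time])
--         if available_times:
--             return agent_path_dict[available_times[-1]]
--         else: # Time is before the first recorded step (e.g. time < 0, or path starts later)
--             return agent_path_dict[min(agent_path_dict.keys())] # Return earliest known position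
-- ===== SOURCE B (Python) =====
-- def get_agent_position_at_time(agent_path_dict, time):
--     """Gets agent position. If time is beyond recorded path, returns last known position."""
--     if not agent_path_dict:
--         return None
--     best_time = best_val = None
--     min_time = min_val = None
--     for t, v in agent_path_dict.items():
--         if t <= time and (best_time is None or t > best_time):
--             best_time, best_val = t, v
--         if min_time is None or t < min_time:
--             min_time, min_val = t, v
--     return best_val if best_time is not None else min_val
-- ===== Notes on version B (the rewrite author's own statement) =====
-- stated objective: simpler
-- what changed: Replaces A's membership test, list-comprehension filter, sort and separate min() with one pass over the items that maintains the best key <= time and the overall minimum key simultaneously.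
import Mathlib
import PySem

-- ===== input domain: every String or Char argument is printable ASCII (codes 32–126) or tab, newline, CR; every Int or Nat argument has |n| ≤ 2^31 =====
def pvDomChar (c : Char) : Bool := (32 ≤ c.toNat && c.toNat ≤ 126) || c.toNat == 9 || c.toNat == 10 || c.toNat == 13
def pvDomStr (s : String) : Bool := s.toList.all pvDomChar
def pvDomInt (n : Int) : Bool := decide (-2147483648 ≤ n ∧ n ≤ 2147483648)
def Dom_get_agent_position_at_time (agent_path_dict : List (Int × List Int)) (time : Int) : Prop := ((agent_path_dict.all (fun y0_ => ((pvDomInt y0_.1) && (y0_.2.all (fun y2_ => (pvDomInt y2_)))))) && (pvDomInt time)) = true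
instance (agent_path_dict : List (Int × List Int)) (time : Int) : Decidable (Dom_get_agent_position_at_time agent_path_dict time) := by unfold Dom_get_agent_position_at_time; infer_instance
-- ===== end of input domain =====

-- B replaces A's membership test + filter + sort + min() by a single pass that tracks the
-- best key ≤ time and the overall minimum key simultaneously (objective: simpler).

-- ===== PORT A =====
def get_agent_position_at_time (agent_path_dict : List (Int × List Int)) (time : Int) : Option (List Int) :=
  let dd := PySem.Dict.mk agent_path_dict
  if agent_path_dict = [] then none
  else if dd.contains time then dd.get? time
  else
    let available_times := PySem.List.sorted (dd.keys.filter (fun t => decide (t ≤ time))) (fun x => x) false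
    if h : available_times ≠ [] then dd.get? (available_times.getLast h)
    else
      match PySem.List.min? dd.keys (fun x => x) with
      | some m => dd.get? m
      | none => none

-- ===== PORT B =====
-- one loop over the items; state = (best_time/best_val, min_time/min_val), each an Option pair
def pvStepB (time : Int) (acc : Option (Int × List Int) × Option (Int × List Int))
    (p : Int × List Int) : Option (Int × List Int) × Option (Int × List Int) :=
  ( (match acc.1 with
     | none => if p.1 ≤ time then some p else none
     | some b => if p.1 ≤ time ∧ b.1 < p.1 then some p else some b),
    (match acc.2 with
     | none => some p
     | some m => if p.1 < m.1 then some p else some m) )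

def get_agent_position_at_time_alt (agent_path_dict : List (Int × List Int)) (time : Int) : Option (List Int) :=
  if agent_path_dict = [] then none
  else
    let st := agent_path_dict.foldl (pvStepB time) (none, none)
    match st.1 with
    | some b => some b.2
    | none => match st.2 with
              | some m => some m.2
              | none => none

-- ===== PRECONDITION & SPEC =====
def Spec_get_agent_position_at_time (agent_path_dict : List (Int × List Int)) (time : Int) (out : Option (List Int)) : Prop := out = get_agent_position_at_time_alt agent_path_dict time
instance (agent_path_dict : List (Int × List Int)) (time : Int) (out : Option (List Int)) : Decidable (Spec_get_agent_position_at_time agent_path_dict time out) := by unfold Spec_get_agent_position_at_time; infer_instance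

-- ===== CLAIM (what is proved, stated in full; the proofs are below) =====
def Claim_equal_get_agent_position_at_time : Prop := ∀ (agent_path_dict : List (Int × List Int)) (time : Int), Dom_get_agent_position_at_time agent_path_dict time → Spec_get_agent_position_at_time agent_path_dict time (get_agent_position_at_time agent_path_dict time)

-- ===== LEMMAS AND PROOFS =====

-- first-match association-list lookup (what Python's dict[k] is over the items list)
def lookA (k : Int) : List (Int × List Int) → Option (List Int)
  | [] => none
  | (k', v) :: t => if k' = k then some v else lookA k t

theorem dict_get?_eq_lookA (d : List (Int × List Int)) (k : Int) :
    (PySem.Dict.mk d).get? k = lookA k d := by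
  induction d with
  | nil => rfl
  | cons p t ih =>
    obtain ⟨k', v⟩ := p
    rw [PySem.Dict.get?_mk_cons, lookA]
    by_cases h : k' = k
    · simp [h]
    · simp [h, ih]

-- running "smaller key wins strictly" / "larger key wins strictly" selectors
def pickm (m q : Int × List Int) : Int × List Int := if q.1 < m.1 then q else m
def pickM (b q : Int × List Int) : Int × List Int := if b.1 < q.1 then q else b

-- the pair fold splits componentwise
theorem foldB_split (time : Int) (l : List (Int × List Int))
    (b0 m0 : Option (Int × List Int)) :
    l.foldl (pvStepB time) (b0, m0) =
      (l.foldl (fun a p => (pvStepB time (a, none) p).1) b0,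
       l.foldl (fun a p => (pvStepB time (none, a) p).2) m0) := by
  induction l generalizing b0 m0 with
  | nil => rfl
  | cons p t ih => simp [List.foldl, pvStepB, ih]

theorem min_fold_eq (l : List (Int × List Int)) (m : Int × List Int) :
    l.foldl (fun a p => (pvStepB 0 (none, a) p).2) (some m) = some (l.foldl pickm m) := by
  induction l generalizing m with
  | nil => rfl
  | cons q t ih =>
    have hstep : (pvStepB 0 (none, some m) q).2 = some (pickm m q) := by
      simp only [pvStepB, pickm]
      by_cases h : q.1 < m.1
      · rw [if_pos h, if_pos h]
      · rw [if_neg h, if_neg h]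
    rw [List.foldl_cons, hstep, ih, List.foldl_cons]

theorem pickm_fst (l : List (Int × List Int)) (m : Int × List Int) :
    (l.foldl pickm m).1 = (l.map Prod.fst).foldl min m.1 := by
  induction l generalizing m with
  | nil => rfl
  | cons q t ih =>
    simp only [List.foldl, List.map, ih, pickm]
    congr 1
    split <;> omega

theorem pickm_cases (l : List (Int × List Int)) (m : Int × List Int) :
    l.foldl pickm m = m ∨ (l.foldl pickm m).1 < m.1 := by
  induction l generalizing m with
  | nil => exact Or.inl rfl
  | cons q t ih =>
    rw [List.foldl_cons]
    by_cases h : q.1 < m.1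
    · rw [show pickm m q = q from if_pos h]
      rcases ih q with h2 | h2
      · right; rw [h2]; exact h
      · right; omega
    · rw [show pickm m q = m from if_neg h]
      exact ih m

theorem pickm_lookup (l : List (Int × List Int)) (m : Int × List Int) :
    lookA (l.foldl pickm m).1 (m :: l) = some (l.foldl pickm m).2 := by
  induction l generalizing m with
  | nil => simp [lookA, List.foldl]
  | cons q t ih =>
    rw [List.foldl_cons]
    by_cases hlt : q.1 < m.1
    · rw [show pickm m q = q from if_pos hlt]
      have hle : (t.foldl pickm q).1 ≤ q.1 := by
        rcases pickm_cases t q with h | h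
        · exact le_of_eq (congrArg Prod.fst h)
        · omega
      rw [lookA, if_neg (show m.1 ≠ (t.foldl pickm q).1 by omega)]
      exact ih q
    · rw [show pickm m q = m from if_neg hlt]
      rcases pickm_cases t m with h | h
      · rw [h]; simp [lookA]
      · have hih := ih m
        rw [lookA, if_neg (show m.1 ≠ (t.foldl pickm m).1 by omega)] at hih
        rw [lookA, if_neg (show m.1 ≠ (t.foldl pickm m).1 by omega),
          lookA, if_neg (show q.1 ≠ (t.foldl pickm m).1 by omega)]
        exact hih

-- the best component with a seed already found
theorem best_fold_some (time : Int) (l : List (Int × List Int)) (q : Int × List Int)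
    (hq : q.1 ≤ time) :
    l.foldl (fun a p => (pvStepB time (a, none) p).1) (some q) =
      some ((l.filter (fun r => decide (r.1 ≤ time))).foldl pickM q) := by
  induction l generalizing q with
  | nil => rfl
  | cons r s ih =>
    by_cases hr : r.1 ≤ time
    · have hstep : (pvStepB time (some q, none) r).1 = some (pickM q r) := by
        simp only [pvStepB, pickM]
        by_cases h : q.1 < r.1
        · rw [if_pos ⟨hr, h⟩, if_pos h]
        · rw [if_neg (fun hc => h hc.2), if_neg h]
      have hqr : (pickM q r).1 ≤ time := by
        simp only [pickM]; split <;> assumption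
      rw [List.foldl_cons, hstep, ih (pickM q r) hqr, List.filter_cons,
        if_pos (by simpa using hr), List.foldl_cons]
    · have hstep : (pvStepB time (some q, none) r).1 = some q := by
        simp only [pvStepB]
        rw [if_neg (fun hc => hr hc.1)]
      rw [List.foldl_cons, hstep, ih q hq, List.filter_cons,
        if_neg (by simpa using hr)]

-- the best component: fold over l = pickM-fold over the ≤ time filter
theorem best_fold_eq (time : Int) (l : List (Int × List Int)) :
    l.foldl (fun a p => (pvStepB time (a, none) p).1) none =
      (match l.filter (fun q => decide (q.1 ≤ time)) with
       | [] => none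
       | p :: t => some (t.foldl pickM p)) := by
  induction l with
  | nil => rfl
  | cons q t ih =>
    by_cases hq : q.1 ≤ time
    · have hstep : (pvStepB time ((none : Option (Int × List Int)), none) q).1 = some q := by
        simp only [pvStepB]; rw [if_pos hq]
      rw [List.foldl_cons, hstep, best_fold_some time t q hq, List.filter_cons,
        if_pos (by simpa using hq)]
    · have hstep : (pvStepB time ((none : Option (Int × List Int)), none) q).1 = none := by
        simp only [pvStepB]; rw [if_neg hq]
      rw [List.foldl_cons, hstep, ih, List.filter_cons, if_neg (by simpa using hq)]

theorem pickM_fst (l : List (Int × List Int)) (b : Int × List Int) :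
    (l.foldl pickM b).1 = (l.map Prod.fst).foldl max b.1 := by
  induction l generalizing b with
  | nil => rfl
  | cons q t ih =>
    simp only [List.foldl, List.map, ih, pickM]
    congr 1
    split <;> omega

theorem pickM_cases (l : List (Int × List Int)) (b : Int × List Int) :
    l.foldl pickM b = b ∨ b.1 < (l.foldl pickM b).1 := by
  induction l generalizing b with
  | nil => exact Or.inl rfl
  | cons q t ih =>
    rw [List.foldl_cons]
    by_cases h : b.1 < q.1
    · rw [show pickM b q = q from if_pos h]
      rcases ih q with h2 | h2
      · right; rw [h2]; exact h
      · right; omega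
    · rw [show pickM b q = b from if_neg h]
      exact ih b

theorem pickM_lookup (l : List (Int × List Int)) (b : Int × List Int) :
    lookA (l.foldl pickM b).1 (b :: l) = some (l.foldl pickM b).2 := by
  induction l generalizing b with
  | nil => simp [lookA, List.foldl]
  | cons q t ih =>
    rw [List.foldl_cons]
    by_cases hlt : b.1 < q.1
    · rw [show pickM b q = q from if_pos hlt]
      have hge : q.1 ≤ (t.foldl pickM q).1 := by
        rcases pickM_cases t q with h | h
        · exact le_of_eq (congrArg Prod.fst h).symm
        · omega
      rw [lookA, if_neg (show b.1 ≠ (t.foldl pickM q).1 by omega)]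
      exact ih q
    · rw [show pickM b q = b from if_neg hlt]
      rcases pickM_cases t b with h | h
      · rw [h]; simp [lookA]
      · have hih := ih b
        rw [lookA, if_neg (show b.1 ≠ (t.foldl pickM b).1 by omega)] at hih
        rw [lookA, if_neg (show b.1 ≠ (t.foldl pickM b).1 by omega),
          lookA, if_neg (show q.1 ≠ (t.foldl pickM b).1 by omega)]
        exact hih

-- lookup of a key ≤ time ignores elements with key > time
theorem lookA_filter (d : List (Int × List Int)) (time k : Int) (hk : k ≤ time) :
    lookA k d = lookA k (d.filter (fun q => decide (q.1 ≤ time))) := by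
  induction d with
  | nil => rfl
  | cons p t ih =>
    by_cases hp : p.1 ≤ time
    · simp only [List.filter_cons, hp, decide_true, if_true]
      obtain ⟨k', v⟩ := p
      rw [lookA, lookA]
      split
      · rfl
      · exact ih
    · simp only [List.filter_cons, hp, decide_false]
      obtain ⟨k', v⟩ := p
      rw [lookA]
      have hne : k' ≠ k := by simp at hp; omega
      rw [if_neg hne]
      exact ih

-- last of an ascending list is ≥ every element
theorem pairwise_le_getLast (l : List Int) (h : l ≠ [])
    (hp : l.Pairwise (· ≤ ·)) : ∀ y ∈ l, y ≤ l.getLast h := by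
  induction l with
  | nil => exact absurd rfl h
  | cons a t ih =>
    intro y hy
    rcases List.mem_cons.mp hy with rfl | hyt
    · cases t with
      | nil => simp
      | cons b s =>
        have hb : y ≤ b := (List.pairwise_cons.mp hp).1 b (List.mem_cons_self)
        have := ih (by simp) (List.pairwise_cons.mp hp).2 b List.mem_cons_self
        rw [List.getLast_cons (by simp)]
        omega
    · cases t with
      | nil => simp at hyt
      | cons b s =>
        rw [List.getLast_cons (by simp)]
        exact ih (by simp) (List.pairwise_cons.mp hp).2 y hyt

-- foldl max / foldl min over Int keys: membership and extremality
theorem foldl_max_mem (l : List Int) (a : Int) : l.foldl max a ∈ a :: l := by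
  induction l generalizing a with
  | nil => simp
  | cons b t ih =>
    rw [List.foldl_cons]
    rcases List.mem_cons.mp (ih (max a b)) with h | h
    · rw [h]
      rcases max_choice a b with hm | hm <;> simp [hm]
    · exact List.mem_cons_of_mem _ (List.mem_cons_of_mem _ h)

theorem foldl_max_ge (l : List Int) (a : Int) : ∀ y ∈ a :: l, y ≤ l.foldl max a := by
  induction l generalizing a with
  | nil => intro y hy; simp at hy ⊢; omega
  | cons b t ih =>
    intro y hy
    rw [List.foldl_cons]
    have h1 : a ≤ max a b := le_max_left a b
    have h2 : b ≤ max a b := le_max_right a b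
    have hseed := ih (max a b) (max a b) List.mem_cons_self
    rcases List.mem_cons.mp hy with rfl | hy'
    · omega
    · rcases List.mem_cons.mp hy' with rfl | hy''
      · omega
      · exact ih (max a b) y (List.mem_cons_of_mem _ hy'')

-- MAIN branch lemma: nonempty filter case — A's result = lookA maxkey d = B's best value
theorem main_nonempty_filter (d : List (Int × List Int)) (time : Int)
    (p : Int × List Int) (l : List (Int × List Int))
    (hf : d.filter (fun q => decide (q.1 ≤ time)) = p :: l) :
    get_agent_position_at_time d time = some (l.foldl pickM p).2 := by
  have hd : d ≠ [] := by
    intro h; rw [h] at hf; simp at hf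
  -- the keys of the filtered list
  have hkeys : (PySem.Dict.mk d).keys = d.map Prod.fst := by
    simp [PySem.Dict.keys_mk]
  have hfkeys : ((PySem.Dict.mk d).keys.filter (fun t => decide (t ≤ time)))
      = p.1 :: l.map Prod.fst := by
    rw [hkeys, List.filter_map]
    have : (fun t => decide (t ≤ time)) ∘ (Prod.fst : Int × List Int → Int)
        = fun q => decide (q.1 ≤ time) := rfl
    rw [this, hf]
    simp
  -- the value B selects: key is the max of filtered keys
  set b := l.foldl pickM p with hb
  have hbfst : b.1 = (l.map Prod.fst).foldl max p.1 := pickM_fst l p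
  have hble : b.1 ≤ time := by
    have hmem : b.1 ∈ p.1 :: l.map Prod.fst := by rw [hbfst]; exact foldl_max_mem _ _
    have : ∀ y ∈ p.1 :: l.map Prod.fst, y ≤ time := by
      intro y hy
      have : y ∈ (d.filter (fun q => decide (q.1 ≤ time))).map Prod.fst := by
        rw [hf]; simpa using hy
      obtain ⟨q, hq, rfl⟩ := List.mem_map.mp this
      have := List.of_mem_filter hq
      simpa using this
    exact this b.1 hmem
  have hbmax : ∀ y ∈ p.1 :: l.map Prod.fst, y ≤ b.1 := by
    rw [hbfst]; exact foldl_max_ge _ _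
  -- lookA at b.1 in d equals some b.2
  have hlook : lookA b.1 d = some b.2 := by
    rw [lookA_filter d time b.1 hble, hf]
    exact pickM_lookup l p
  unfold get_agent_position_at_time
  simp only [if_neg hd]
  by_cases hc : (PySem.Dict.mk d).contains time = true
  · -- time is a key; then b.1 = time
    have htmem : time ∈ (PySem.Dict.mk d).keys := by
      rw [PySem.Dict.contains_eq_decide_mem_keys] at hc
      simpa using hc
    have htf : time ∈ p.1 :: l.map Prod.fst := by
      rw [← hfkeys]
      exact List.mem_filter.mpr ⟨htmem, by simp⟩
    have : b.1 = time := le_antisymm hble (hbmax time htf)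
    rw [if_pos hc, dict_get?_eq_lookA, ← this, hlook]
  · rw [if_neg hc]
    have hats : PySem.List.sorted ((PySem.Dict.mk d).keys.filter (fun t => decide (t ≤ time))) (fun x => x) false ≠ [] := by
      intro hnil
      rw [PySem.List.sorted_eq_nil_iff, hfkeys] at hnil
      simp at hnil
    rw [dif_pos hats]
    set s := PySem.List.sorted ((PySem.Dict.mk d).keys.filter (fun t => decide (t ≤ time))) (fun x => x) false with hs
    -- last of sorted = b.1
    have hperm : s.Perm (p.1 :: l.map Prod.fst) := by
      rw [hs, hfkeys]; exact PySem.List.sorted_perm _ _ _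
    have hpw : s.Pairwise (· ≤ ·) := by
      have := PySem.List.sorted_pairwise ((PySem.Dict.mk d).keys.filter (fun t => decide (t ≤ time))) (fun x => x)
      simpa using this
    have hlast_mem : s.getLast hats ∈ p.1 :: l.map Prod.fst :=
      hperm.mem_iff.mp (List.getLast_mem hats)
    have hlast_ge : b.1 ≤ s.getLast hats := by
      have hbmem_s : b.1 ∈ s := by
        rw [hperm.mem_iff, hbfst]; exact foldl_max_mem _ _
      exact pairwise_le_getLast s hats hpw b.1 hbmem_s
    have : s.getLast hats = b.1 := le_antisymm (hbmax _ hlast_mem) hlast_ge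
    rw [this, dict_get?_eq_lookA, hlook]

-- min-fold step is time-independent
theorem min_step_time_indep (time : Int) (l : List (Int × List Int)) (a : Option (Int × List Int)) :
    l.foldl (fun a p => (pvStepB time (none, a) p).2) a
      = l.foldl (fun a p => (pvStepB 0 (none, a) p).2) a := by
  induction l generalizing a with
  | nil => rfl
  | cons q t ih => simp only [List.foldl, pvStepB]

-- ===== VERDICT (by name: the statement is the Claim_ definition above) =====
theorem get_agent_position_at_time_spec : Claim_equal_get_agent_position_at_time := by
  intro d time _
  unfold Spec_get_agent_position_at_time
  rcases d with _ | ⟨p, l⟩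
  · rfl
  · have hdne : (p :: l) ≠ ([] : List (Int × List Int)) := by simp
    unfold get_agent_position_at_time_alt
    rw [if_neg hdne]
    simp only
    rw [foldB_split]
    rcases hf : (p :: l).filter (fun q => decide (q.1 ≤ time)) with _ | ⟨pf, lf⟩
    · -- no key ≤ time: best = none, fall back to min
      rw [best_fold_eq, hf]
      simp only
      rw [List.foldl_cons]
      have hstep0 : (pvStepB time ((none : Option (Int × List Int)), none) p).2 = some p := rfl
      rw [hstep0, min_step_time_indep, min_fold_eq]
      simp only
      -- A's side: not contains, ats empty, min? branch
      set m := l.foldl pickm p with hm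
      have hmfst : m.1 = (l.map Prod.fst).foldl min p.1 := pickm_fst l p
      have hnok : ∀ q ∈ (p :: l), ¬ q.1 ≤ time := by
        intro q hq hle
        have : q ∈ (p :: l).filter (fun q => decide (q.1 ≤ time)) :=
          List.mem_filter.mpr ⟨hq, by simpa using hle⟩
        rw [hf] at this; simp at this
      unfold get_agent_position_at_time
      rw [if_neg hdne]
      have hkeys : (PySem.Dict.mk (p :: l)).keys = (p :: l).map Prod.fst := by
        simp [PySem.Dict.keys_mk]
      have hnc : ¬ (PySem.Dict.mk (p :: l)).contains time = true := by
        intro hc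
        rw [PySem.Dict.contains_eq_decide_mem_keys] at hc
        have : time ∈ (PySem.Dict.mk (p :: l)).keys := by simpa using hc
        rw [hkeys] at this
        obtain ⟨q, hq, hq1⟩ := List.mem_map.mp this
        exact hnok q hq (le_of_eq hq1)
      rw [if_neg hnc]
      have hfe : ((PySem.Dict.mk (p :: l)).keys.filter (fun t => decide (t ≤ time))) = [] := by
        rw [hkeys, List.filter_map]
        have : (fun t => decide (t ≤ time)) ∘ (Prod.fst : Int × List Int → Int)
            = fun q => decide (q.1 ≤ time) := rfl
        rw [this, hf]; simp
      have hats : ¬ (PySem.List.sorted ((PySem.Dict.mk (p :: l)).keys.filter (fun t => decide (t ≤ time))) (fun x => x) false ≠ []) := by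
        intro hne
        apply hne
        rw [PySem.List.sorted_eq_nil_iff]
        exact hfe
      rw [dif_neg hats]
      have hkc : (PySem.Dict.mk (p :: l)).keys = p.1 :: l.map Prod.fst := by
        rw [hkeys]; rfl
      rw [hkc, PySem.List.min?_id_cons]
      simp only
      rw [dict_get?_eq_lookA, ← hmfst]
      rw [show lookA m.1 (p :: l) = some m.2 from pickm_lookup l p]
    · -- some key ≤ time: best branch fires
      rw [best_fold_eq, hf]
      simp only
      exact main_nonempty_filter (p :: l) time pf lf hf
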